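-- pv_equiv track=rewrite | github.com/jairoandrescastaneda/BooyerMooreSunday | bmhs.py | search_letter_in_pattern
-- ===== SOURCE A (Python) =====
-- def search_letter_in_pattern(pattern,letter):
--     """
--     Reemplazo de la tabla del last character del articulo
--     """
--     m = len(pattern)
--     count = 1
--
--     for i in range(m-1,-1,-1):
--         if letter==pattern[i]:
--             return count
--
--         count = count+1
--
--     return -1
-- ===== SOURCE B (Python) =====
-- def search_letter_in_pattern(pattern, letter):
--     # Single left-to-right pass keeping the index of the last (rightmost) match,
--     # then convert it to a distance from the end; no early return.
--     last = -1
--     for i, ch in enumerate(pattern):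
--         if ch == letter:
--             last = i
--     return -1 if last == -1 else len(pattern) - last
-- ===== Notes on version B (the rewrite author's own statement) =====
-- stated objective: alternative
-- what changed: Replaced the right-to-left scan with an incrementing counter and early return by a full left-to-right pass that accumulates the last matching index and converts it to a distance from the end after the loop.
import Mathlib
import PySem

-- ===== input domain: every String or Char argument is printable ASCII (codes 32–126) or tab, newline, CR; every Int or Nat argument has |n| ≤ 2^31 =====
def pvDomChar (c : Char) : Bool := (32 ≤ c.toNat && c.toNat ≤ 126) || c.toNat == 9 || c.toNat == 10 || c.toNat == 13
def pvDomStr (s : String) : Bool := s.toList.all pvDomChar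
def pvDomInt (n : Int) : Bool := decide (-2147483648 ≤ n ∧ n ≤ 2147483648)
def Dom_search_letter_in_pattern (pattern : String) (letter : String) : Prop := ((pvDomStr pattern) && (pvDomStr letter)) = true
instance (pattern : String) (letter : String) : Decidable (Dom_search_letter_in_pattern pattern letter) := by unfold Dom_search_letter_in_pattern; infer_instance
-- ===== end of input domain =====

-- B replaces A's right-to-left early-return counter by a full left-to-right pass
-- accumulating the last matching index (objective: alternative, same cost).

-- ===== PORT A =====
-- A's loop 'for i in range(m-1,-1,-1)' visits the characters from the right;
-- ported as structural recursion over the reversed character list with the same count state.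
def slipLoopA (letter : String) : List Char → Int → Int
  | [], _ => -1
  | c :: rest, count =>
      if letter == String.mk [c] then count
      else slipLoopA letter rest (count + 1)

def search_letter_in_pattern (pattern : String) (letter : String) : Int :=
  slipLoopA letter pattern.toList.reverse 1

-- ===== PORT B =====
def search_letter_in_pattern_alt (pattern : String) (letter : String) : Int :=
  let cs := pattern.toList
  let last := (PySem.List.enumerate cs 0).foldl
      (fun acc p => if String.mk [p.2] == letter then p.1 else acc) (-1)
  if last == -1 then -1 else (cs.length : Int) - last

-- ===== PRECONDITION & SPEC =====
def Spec_search_letter_in_pattern (pattern : String) (letter : String) (out : Int) : Prop := out = search_letter_in_pattern_alt pattern letter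
instance (pattern : String) (letter : String) (out : Int) : Decidable (Spec_search_letter_in_pattern pattern letter out) := by unfold Spec_search_letter_in_pattern; infer_instance

-- ===== CLAIM (what is proved, stated in full; the proofs are below) =====
def Claim_equal_search_letter_in_pattern : Prop := ∀ (pattern : String) (letter : String), Dom_search_letter_in_pattern pattern letter → Spec_search_letter_in_pattern pattern letter (search_letter_in_pattern pattern letter)

-- ===== LEMMAS AND PROOFS =====

-- rightmost index i with letter == pattern[i] (as an Option Nat), the common specification
def ridx (letter : String) : List Char → Option Nat
  | [] => none
  | c :: cs =>
      match ridx letter cs with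
      | some r => some (r + 1)
      | none => if letter == String.mk [c] then some 0 else none

lemma ridx_none_iff (letter : String) (cs : List Char) :
    ridx letter cs = none ↔ ∀ c ∈ cs, ¬ (letter == String.mk [c] : Bool) := by
  induction cs with
  | nil => simp [ridx]
  | cons c cs ih =>
      simp only [ridx, List.mem_cons]
      cases h : ridx letter cs with
      | some r =>
          rw [h] at ih
          simp only [reduceCtorEq, false_iff, not_forall] at ih
          simp only [reduceCtorEq, false_iff, not_forall]
          obtain ⟨x, hx, hb⟩ := ih
          exact ⟨x, Or.inr hx, hb⟩
      | none =>
          rw [h] at ih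
          replace ih := ih.mp rfl
          by_cases hc : (letter == String.mk [c] : Bool)
          · simp only [if_pos hc, reduceCtorEq, false_iff, not_forall]
            exact ⟨c, Or.inl rfl, not_not_intro hc⟩
          · constructor
            · intro _ x hx
              rcases hx with rfl | hx
              · exact hc
              · exact ih x hx
            · intro _
              rw [if_neg hc]

lemma slipLoopA_append (letter : String) (xs ys : List Char) (k : Int) :
    slipLoopA letter (xs ++ ys) k =
      if xs.any (fun c => letter == String.mk [c]) then slipLoopA letter xs k
      else slipLoopA letter ys (k + xs.length) := by
  induction xs generalizing k with
  | nil => simp [slipLoopA]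
  | cons c xs ih =>
      by_cases hc : (letter == String.mk [c] : Bool)
      · simp [slipLoopA, hc]
      · have hcf : (letter == String.mk [c]) = false := by simpa using hc
        have hstep : ∀ (zs : List Char) (k' : Int),
            slipLoopA letter (c :: zs) k' = slipLoopA letter zs (k' + 1) := by
          intro zs k'
          simp [slipLoopA, hcf]
        rw [List.cons_append, hstep, ih, hstep, List.any_cons, hcf, Bool.false_or,
          List.length_cons]
        split_ifs with h
        · rfl
        · congr 1
          push_cast
          ring

lemma slipLoopA_reverse (letter : String) (cs : List Char) :
    slipLoopA letter cs.reverse 1 =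
      match ridx letter cs with
      | some r => (cs.length : Int) - r
      | none => -1 := by
  induction cs with
  | nil => simp [slipLoopA, ridx]
  | cons c cs ih =>
      have hrev : (c :: cs).reverse = cs.reverse ++ [c] := by simp
      rw [hrev, slipLoopA_append]
      cases h : ridx letter cs with
      | some r =>
          have hany : cs.reverse.any (fun c => letter == String.mk [c]) = true := by
            by_contra hno
            have : ridx letter cs = none := by
              rw [ridx_none_iff]
              intro x hx
              simp only [List.any_eq_true, not_exists, not_and] at hno
              exact fun hb => (hno x (by simpa using hx)) hb
            simp [this] at h
          rw [h] at ih
          simp only [hany, if_pos, ih, ridx, h, List.length_cons]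
          push_cast; ring
      | none =>
          have hno : cs.reverse.any (fun c => letter == String.mk [c]) = false := by
            rw [List.any_eq_false]
            intro x hx
            exact (ridx_none_iff letter cs).mp h x (by simpa using hx)
          simp only [hno, Bool.false_eq_true, if_neg, List.length_reverse, ridx, h,
            List.length_cons]
          by_cases hc : (letter == String.mk [c] : Bool)
          · simp [slipLoopA, hc]; push_cast; ring
          · simp [slipLoopA, hc]

lemma foldB_eq (letter : String) (cs : List Char) (s acc : Int) :
    (PySem.List.enumerate cs s).foldl
        (fun acc p => if String.mk [p.2] == letter then p.1 else acc) acc =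
      match ridx letter cs with
      | some r => s + r
      | none => acc := by
  induction cs generalizing s acc with
  | nil => simp [PySem.List.enumerate_nil, ridx]
  | cons c cs ih =>
      have hcomm : (String.mk [c] == letter : Bool) = (letter == String.mk [c] : Bool) := by
        by_cases h : String.mk [c] = letter
        · simp [h]
        · simp [h, Ne.symm h]
      rw [PySem.List.enumerate_cons, List.foldl_cons, ih]
      cases h : ridx letter cs with
      | some r => simp only [ridx, h]; push_cast; ring
      | none => simp only [ridx, h, hcomm]; split_ifs <;> simp

-- ===== VERDICT (by name: the statement is the Claim_ definition above) =====
theorem search_letter_in_pattern_spec : Claim_equal_search_letter_in_pattern := by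
  intro pattern letter _
  unfold Spec_search_letter_in_pattern search_letter_in_pattern search_letter_in_pattern_alt
  simp only
  rw [slipLoopA_reverse, foldB_eq]
  cases h : ridx letter pattern.toList with
  | none => simp
  | some r =>
      have h0 : (((0 : Int) + (r : Int)) == (-1 : Int)) = false := by
        rw [beq_eq_false_iff_ne]
        omega
      simp [h0]
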